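-- pv_equiv track=rewrite | github.com/mgukowsky/advent-of-code | 2024/12/2.py | fence_price
-- ===== SOURCE A (Python) =====
-- MOVES = [(1, 0), (-1, 0), (0, 1), (0, -1)]
--
-- def is_valid_space(coord, grid):
--     return (
--         coord[0] > -1
--         and coord[0] < len(grid)
--         and coord[1] > -1
--         and coord[1] < len(grid[0])
--     )
--
-- def parse_input(input):
--     return [[val for val in line] for line in input.splitlines()]
--
-- def evaluate_edge(grid, coord, move, edge_map_x, edge_map_y):
--     # If we are changing the y coordinate, then the edge lies on the x axis
--     is_x_edge = move in [(1, 0), (-1, 0)]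
--
--     # We map one element of the coordinate to a set of the other elements that we've seen
--     # For example, a straight line [0, 0], [0, 1], [0, 2] would reduce to {0: [0,1,2]}
--     edge_map = edge_map_y if is_x_edge else edge_map_x
--     edge_key = coord[0] if is_x_edge else coord[1]
--     edge_val = coord[1] if is_x_edge else coord[0]
--
--     if edge_key not in edge_map:
--         edge_map[edge_key] = set([(edge_val, move)])
--     else:
--         edge_map[edge_key].add((edge_val, move))
--
--     # Get the two possibly adjacent edges
--     l_edge = (edge_val - 1, move)
--     r_edge = (edge_val + 1, move)
--
--     # We are connecting two edges, which means that two separate edges are being combined into one side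
--     if (l_edge in edge_map[edge_key]) and (r_edge in edge_map[edge_key]):
--         return -1
--
--     # We are connecting to another edge, which means that we are extending a side
--     elif (l_edge in edge_map[edge_key]) or (r_edge in edge_map[edge_key]):
--         return 0
--
--     # We have found a new side
--     else:
--         return 1
--
-- def get_area_x_sides(grid, coord, plant_type, visited):
--     if coord in visited:
--         return 0
--
--     plants_to_visit = [coord]
--     visited.add(coord)
--
--     area = 0
--     edge_map_x = {}
--     edge_map_y = {}
--     sides = 0
--     while len(plants_to_visit) > 0:
--         plant = plants_to_visit.pop(0)
--         area += 1
--
--         for move in MOVES: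
--             next_plant = (plant[0] + move[0], plant[1] + move[1])
--             if (not is_valid_space(next_plant, grid)) or grid[next_plant[0]][
--                 next_plant[1]
--             ] != plant_type:
--                 sides += evaluate_edge(grid, plant, move, edge_map_x, edge_map_y)
--             elif next_plant not in visited:
--                 plants_to_visit.append(next_plant)
--                 visited.add(next_plant)
--
--     return area * sides
--
-- def fence_price(input):
--     grid = parse_input(input)
--
--     visited = set()
--     sum = 0
--
--     for y, row in enumerate(grid):
--         for x, plant in enumerate(row):
--             sum += get_area_x_sides(grid, (y, x), plant, visited)
--
--     return sum
-- ===== SOURCE B (Python) =====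
-- def fence_price(input):
--     grid = [list(line) for line in input.splitlines()]
--     rows = len(grid)
--     cols = len(grid[0]) if grid else 0
--
--     def sp(y, x, plant):
--         return 0 <= y < rows and 0 <= x < cols and grid[y][x] == plant
--
--     visited = set()
--     total = 0
--     for y, row in enumerate(grid):
--         for x in range(len(row)):
--             if (y, x) in visited:
--                 continue
--             plant = row[x]
--             visited.add((y, x))
--             region = [(y, x)]
--             i = 0
--             while i < len(region):
--                 cy, cx = region[i]
--                 i += 1
--                 for ny, nx in ((cy + 1, cx), (cy - 1, cx), (cy, cx + 1), (cy, cx - 1)):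
--                     if sp(ny, nx, plant) and (ny, nx) not in visited:
--                         visited.add((ny, nx))
--                         region.append((ny, nx))
--             # sides == number of cells where a border segment STARTS (a corner):
--             # the predecessor cell along the border either is not in the region
--             # or carries no border in that direction.
--             in_region = set(region)
--             sides = 0
--             for cy, cx in region:
--                 for dy, dx in ((1, 0), (-1, 0), (0, 1), (0, -1)):
--                     if sp(cy + dy, cx + dx, plant):
--                         continue
--                     py, px = (cy, cx - 1) if dx == 0 else (cy - 1, cx)
--                     if (py, px) not in in_region or sp(py + dy, px + dx, plant):
--                         sides += 1
--             total += len(region) * sides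
--     return total
-- ===== Notes on version B (the rewrite author's own statement) =====
-- stated objective: alternative
-- what changed: B replaces A's pop(0) queue plus incremental edge_map dict-of-sets side bookkeeping (+1/0/-1 deltas) by an index-pointer flood fill that gathers the region list, followed by a pure post-pass that counts sides as the border segments that start at a cell (corner counting).
import Mathlib
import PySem

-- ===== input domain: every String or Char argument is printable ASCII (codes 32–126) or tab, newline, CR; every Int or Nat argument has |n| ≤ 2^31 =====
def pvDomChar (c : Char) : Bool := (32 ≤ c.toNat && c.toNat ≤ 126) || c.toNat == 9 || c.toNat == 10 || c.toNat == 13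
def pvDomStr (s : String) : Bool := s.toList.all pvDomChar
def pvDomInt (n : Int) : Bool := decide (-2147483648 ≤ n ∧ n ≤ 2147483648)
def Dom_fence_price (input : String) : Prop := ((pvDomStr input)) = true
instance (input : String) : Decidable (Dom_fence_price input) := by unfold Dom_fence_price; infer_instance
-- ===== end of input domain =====

-- B replaces A's pop(0) queue and incremental edge_map dict-of-sets side bookkeeping by an
-- index-pointer flood fill gathering the region list, then a pure post-pass counting sides
-- as border segments that start at a cell.

-- ===== PORT A =====
def movesA : List (Int × Int) := [(1, 0), (-1, 0), (0, 1), (0, -1)]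

def is_valid_space (coord : Int × Int) (grid : List (List Char)) : Bool :=
  decide (coord.1 > -1) && decide (coord.1 < PySem.List.len grid)
    && decide (coord.2 > -1)
    && decide (coord.2 < PySem.List.len (PySem.List.pyGetD grid 0 []))
    -- grid[0]: in Python reached only with grid nonempty (short-circuit `and`); pyGetD is exact there

abbrev EMap := PySem.Dict Int (PySem.Set (Int × (Int × Int)))

def evaluate_edge (coord move : Int × Int) (emx emy : EMap) : Int × EMap × EMap :=
  let isX := [((1 : Int), (0 : Int)), (-1, 0)].contains move
  let em0 := if isX then emy else emx
  let ek := if isX then coord.1 else coord.2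
  let ev := if isX then coord.2 else coord.1
  -- Python mutates the set stored at ek in place; ported as an overwriting insert (position kept)
  let em := if em0.contains ek
            then em0.insert ek (PySem.Set.add (em0.getD ek PySem.Set.empty) (ev, move))
            else em0.insert ek (PySem.Set.ofList [(ev, move)])
  let s := em.getD ek PySem.Set.empty
  let hasL := PySem.Set.contains s (ev - 1, move)
  let hasR := PySem.Set.contains s (ev + 1, move)
  let delta : Int := if hasL && hasR then -1 else if hasL || hasR then 0 else 1
  if isX then (delta, emx, em) else (delta, em, emy)

def stepA (grid : List (List Char)) (pt : Char) (plant : Int × Int)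
    (st : List (Int × Int) × PySem.Set (Int × Int) × Int × EMap × EMap) (move : Int × Int) :
    List (Int × Int) × PySem.Set (Int × Int) × Int × EMap × EMap :=
  let np := (plant.1 + move.1, plant.2 + move.2)
  if !(is_valid_space np grid)
      || !(PySem.List.pyGetD (PySem.List.pyGetD grid np.1 []) np.2 ' ' == pt) then
    let r := evaluate_edge plant move st.2.2.2.1 st.2.2.2.2
    (st.1, st.2.1, st.2.2.1 + r.1, r.2.1, r.2.2)
  else if !(PySem.Set.contains st.2.1 np) then
    (st.1 ++ [np], PySem.Set.add st.2.1 np, st.2.2.1, st.2.2.2.1, st.2.2.2.2)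
  else st

-- termination machinery for A's BFS while-loop (cells of the grid not yet visited)
def cellsOf (grid : List (List Char)) : List (Int × Int) :=
  (PySem.List.pyRange 0 (PySem.List.len grid) 1).flatMap (fun y =>
    (PySem.List.pyRange 0 (PySem.List.len (PySem.List.pyGetD grid 0 [])) 1).map
      (fun x => (y, x)))

def unseen (grid : List (List Char)) (v : PySem.Set (Int × Int)) : Nat :=
  ((cellsOf grid).filter (fun c => !(PySem.Set.contains v c))).length

theorem valid_mem_cells {c : Int × Int} {grid : List (List Char)}
    (h : is_valid_space c grid = true) : c ∈ cellsOf grid := by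
  obtain ⟨a, b⟩ := c
  simp only [is_valid_space, Bool.and_eq_true, decide_eq_true_eq, PySem.List.len_eq] at h
  obtain ⟨⟨⟨h1, h2⟩, h3⟩, h4⟩ := h
  refine List.mem_flatMap.2 ⟨a, ?_, List.mem_map.2 ⟨b, ?_, rfl⟩⟩ <;>
    simp only [PySem.List.mem_pyRange_one, PySem.List.len_eq] <;> omega

theorem unseen_add_lt {c : Int × Int} {grid : List (List Char)} {v : PySem.Set (Int × Int)}
    (hc : c ∈ cellsOf grid) (hv : PySem.Set.contains v c = false) :
    unseen grid (PySem.Set.add v c) < unseen grid v := by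
  have hnm : c ∉ v := by
    intro hm
    rw [(PySem.Set.contains_iff v c).2 hm] at hv
    cases hv
  rw [unseen, unseen, PySem.Set.add_of_not_mem hnm]
  have hcg : ∀ x : Int × Int, (!(PySem.Set.contains (v ++ [c]) x))
      = ((!(x == c)) && !(PySem.Set.contains v x)) := by
    intro x
    by_cases hx : x = c
    · subst hx; simp [PySem.Set.contains_eq_listContains]
    · simp [PySem.Set.contains_eq_listContains, hx]
  rw [List.filter_congr (fun x _ => hcg x), ← List.filter_filter]
  apply List.length_filter_lt_length_iff_exists.2
  refine ⟨c, List.mem_filter.2 ⟨hc, by simpa using hv⟩, by simp⟩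

theorem stepA_measure (grid : List (List Char)) (pt : Char) (plant : Int × Int) :
    ∀ (M : List (Int × Int)) q v s ex ey,
    4 * unseen grid (M.foldl (stepA grid pt plant) (q, v, s, ex, ey)).2.1
        + (M.foldl (stepA grid pt plant) (q, v, s, ex, ey)).1.length
      ≤ 4 * unseen grid v + q.length := by
  intro M
  induction M with
  | nil => intro q v s ex ey; exact Nat.le_refl _
  | cons m M ih =>
    intro q v s ex ey
    simp only [List.foldl_cons]
    rcases hb : (!(is_valid_space (plant.1 + m.1, plant.2 + m.2) grid)
        || !(PySem.List.pyGetD (PySem.List.pyGetD grid (plant.1 + m.1) [])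
              (plant.2 + m.2) ' ' == pt)) with _ | _
    · rcases hc : PySem.Set.contains v (plant.1 + m.1, plant.2 + m.2) with _ | _
      · -- fresh same-plot neighbour: enqueued and marked visited
        have hval : is_valid_space (plant.1 + m.1, plant.2 + m.2) grid = true := by
          rcases h : is_valid_space (plant.1 + m.1, plant.2 + m.2) grid with _ | _
          · rw [h] at hb; simp at hb
          · rfl
        have hlt := unseen_add_lt (valid_mem_cells hval) hc
        have := ih (q ++ [(plant.1 + m.1, plant.2 + m.2)])
          (PySem.Set.add v (plant.1 + m.1, plant.2 + m.2)) s ex ey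
        rw [show stepA grid pt plant (q, v, s, ex, ey) m
            = (q ++ [(plant.1 + m.1, plant.2 + m.2)],
               PySem.Set.add v (plant.1 + m.1, plant.2 + m.2), s, ex, ey) by
          simp only [stepA]; rw [hb, hc]; simp]
        simp only [List.length_append, List.length_cons, List.length_nil] at *
        omega
      · rw [show stepA grid pt plant (q, v, s, ex, ey) m = (q, v, s, ex, ey) by
          simp only [stepA]; rw [hb, hc]; simp]
        exact ih q v s ex ey
    · -- border: only sides/edge maps change
      rw [show stepA grid pt plant (q, v, s, ex, ey) m
          = (q, v, s + (evaluate_edge plant m ex ey).1, (evaluate_edge plant m ex ey).2.1,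
             (evaluate_edge plant m ex ey).2.2) by
        simp only [stepA]; rw [hb]; simp]
      exact ih q v _ _ _

def bfsA (grid : List (List Char)) (pt : Char) (queue : List (Int × Int))
    (visited : PySem.Set (Int × Int)) (area sides : Int) (emx emy : EMap) :
    Int × Int × PySem.Set (Int × Int) :=
  match queue with
  | [] => (area, sides, visited)
  | plant :: rest =>
    let st := movesA.foldl (stepA grid pt plant) (rest, visited, sides, emx, emy)
    bfsA grid pt st.1 st.2.1 (area + 1) st.2.2.1 st.2.2.2.1 st.2.2.2.2
  termination_by 4 * unseen grid visited + queue.length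
  decreasing_by
    have h := stepA_measure grid pt plant movesA rest visited sides emx emy
    simp only [List.length_cons] at *
    omega

def get_area_x_sides (grid : List (List Char)) (coord : Int × Int) (pt : Char)
    (visited : PySem.Set (Int × Int)) : Int × PySem.Set (Int × Int) :=
  if PySem.Set.contains visited coord then (0, visited)
  else
    let r := bfsA grid pt [coord] (PySem.Set.add visited coord) 0 0 PySem.Dict.empty PySem.Dict.empty
    (r.1 * r.2.1, r.2.2)

def fence_price (input : String) : Int :=
  let grid := (PySem.Str.splitlines input).map (fun l => l.toList)
  ((PySem.List.enumerate grid 0).foldl (fun (acc : Int × PySem.Set (Int × Int)) yr =>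
      (PySem.List.enumerate yr.2 0).foldl (fun acc2 xp =>
        let r := get_area_x_sides grid (yr.1, xp.1) xp.2 acc2.2
        (acc2.1 + r.1, r.2)) acc)
    (0, PySem.Set.empty)).1

-- ===== PORT B =====
def spB (grid : List (List Char)) (rows cols y x : Int) (pt : Char) : Bool :=
  decide (0 ≤ y) && decide (y < rows) && decide (0 ≤ x) && decide (x < cols)
    && (PySem.List.pyGetD (PySem.List.pyGetD grid y []) x ' ' == pt)

def pushB (grid : List (List Char)) (rows cols : Int) (pt : Char)
    (st : List (Int × Int) × PySem.Set (Int × Int)) (ny nx : Int) :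
    List (Int × Int) × PySem.Set (Int × Int) :=
  if spB grid rows cols ny nx pt && !(PySem.Set.contains st.2 (ny, nx)) then
    (st.1 ++ [(ny, nx)], PySem.Set.add st.2 (ny, nx))
  else st

-- the while loop advances an index into the growing region list; ported with a fuel
-- counter (rows*cols + 1 is enough, proved in the equivalence proof) that, when it
-- runs out, returns the same state the loop's exit returns
def floodB (grid : List (List Char)) (rows cols : Int) (pt : Char) :
    Nat → List (Int × Int) → Int → PySem.Set (Int × Int) →
    List (Int × Int) × PySem.Set (Int × Int)
  | 0, region, _, visited => (region, visited)
  | fuel + 1, region, i, visited =>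
    match PySem.List.pyGet? region i with
    | none => (region, visited)
    | some c =>
      let st1 := pushB grid rows cols pt (region, visited) (c.1 + 1) c.2
      let st2 := pushB grid rows cols pt st1 (c.1 - 1) c.2
      let st3 := pushB grid rows cols pt st2 c.1 (c.2 + 1)
      let st4 := pushB grid rows cols pt st3 c.1 (c.2 - 1)
      floodB grid rows cols pt fuel st4.1 (i + 1) st4.2

def prevB (c : Int × Int) (dy dx : Int) : Int × Int :=
  if dx == 0 then (c.1, c.2 - 1) else (c.1 - 1, c.2)

def sidesB (grid : List (List Char)) (rows cols : Int) (pt : Char)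
    (region : List (Int × Int)) (inR : PySem.Set (Int × Int)) : Int :=
  region.foldl (fun acc c =>
    [((1 : Int), (0 : Int)), (-1, 0), (0, 1), (0, -1)].foldl (fun a2 m =>
      if spB grid rows cols (c.1 + m.1) (c.2 + m.2) pt then a2
      else if !(PySem.Set.contains inR (prevB c m.1 m.2))
              || spB grid rows cols ((prevB c m.1 m.2).1 + m.1) ((prevB c m.1 m.2).2 + m.2) pt
        then a2 + 1 else a2) acc) 0

def fence_price_alt (input : String) : Int :=
  let grid := (PySem.Str.splitlines input).map (fun l => l.toList)
  let rows := PySem.List.len grid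
  let cols := if grid.isEmpty then 0 else PySem.List.len (PySem.List.pyGetD grid 0 [])
  ((PySem.List.enumerate grid 0).foldl (fun (acc : Int × PySem.Set (Int × Int)) yr =>
      (PySem.List.pyRange 0 (PySem.List.len yr.2) 1).foldl (fun acc2 x =>
        if PySem.Set.contains acc2.2 (yr.1, x) then acc2
        else
          let pt := PySem.List.pyGetD yr.2 x ' '
          let r := floodB grid rows cols pt ((rows * cols).toNat + 1) [(yr.1, x)] 0
                     (PySem.Set.add acc2.2 (yr.1, x))
          (acc2.1 + PySem.List.len r.1 * sidesB grid rows cols pt r.1 (PySem.Set.ofList r.1),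
           r.2)) acc)
    (0, PySem.Set.empty)).1

-- ===== PRECONDITION & SPEC =====
-- Pre_ excludes exactly the inputs on which A raises IndexError: a later line shorter than the
-- first line (A's bound check uses len(grid[0]), so such a missing cell is always probed).
def Pre_fence_price (input : String) : Prop :=
  ∀ l ∈ (PySem.Str.splitlines input).tail,
    ((PySem.Str.splitlines input).headD "").length ≤ l.length
instance (input : String) : Decidable (Pre_fence_price input) := by
  unfold Pre_fence_price; infer_instance

def pvWitness_fence_price : String := "AAB\nABB"

def Spec_fence_price (input : String) (out : Int) : Prop := out = fence_price_alt input
instance (input : String) (out : Int) : Decidable (Spec_fence_price input out) := by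
  unfold Spec_fence_price; infer_instance

-- ===== CLAIM (what is proved, stated in full; the proofs are below) =====
def Claim_equal_fence_price : Prop :=
  ∀ (input : String), Dom_fence_price input → Pre_fence_price input →
    Spec_fence_price input (fence_price input)

-- ===== LEMMAS AND PROOFS =====

-- ---- ghost notions used only by the proofs ----
abbrev Cell := Int × Int

def isXm (m : Cell) : Bool := [((1 : Int), (0 : Int)), (-1, 0)].contains m

def cellOf (m : Cell) (k v : Int) : Cell := if isXm m then (k, v) else (v, k)

def same_plotG (grid : List (List Char)) (coord : Cell) (pt : Char) : Bool :=
  decide (0 ≤ coord.1) && decide (coord.1 < PySem.List.len grid)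
    && decide (0 ≤ coord.2) && decide (coord.2 < PySem.List.len (PySem.List.pyGetD grid 0 []))
    && (PySem.List.pyGetD (PySem.List.pyGetD grid coord.1 []) coord.2 ' ' == pt)

theorem spB_canon (grid : List (List Char)) (y x : Int) (pt : Char) :
    spB grid (PySem.List.len grid) (PySem.List.len (PySem.List.pyGetD grid 0 [])) y x pt
      = same_plotG grid (y, x) pt := rfl

def borderCk (grid : List (List Char)) (pt : Char) (c m : Cell) : Bool :=
  !(same_plotG grid (c.1 + m.1, c.2 + m.2) pt)

def prev_cell (c m : Cell) : Cell :=
  if m.2 == 0 then (c.1, c.2 - 1) else (c.1 - 1, c.2)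

def next_cell (c m : Cell) : Cell :=
  if m.2 == 0 then (c.1, c.2 + 1) else (c.1 + 1, c.2)

def pairsOf (grid : List (List Char)) (pt : Char) (c : Cell) (M : List Cell) : List (Cell × Cell) :=
  M.filterMap (fun m => if borderCk grid pt c m then some (c, m) else none)

def Epairs (grid : List (List Char)) (pt : Char) (R : List Cell) : List (Cell × Cell) :=
  R.flatMap (fun c => pairsOf grid pt c movesA)

def prevp (p : Cell × Cell) : Cell × Cell := (prev_cell p.1 p.2, p.2)

def LEcnt (E : List (Cell × Cell)) : Int :=
  (E.countP (fun p => !(decide (prevp p ∈ E))) : Nat)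

def Chr (ex ey : EMap) (E : List (Cell × Cell)) : Prop :=
  ∀ (k w : Int) (m : Cell), m ∈ movesA →
    (PySem.Set.contains ((if isXm m then ey else ex).getD k PySem.Set.empty) (w, m) = true
      ↔ (cellOf m k w, m) ∈ E)

-- ---- small facts ----
theorem prev_cell_ne (c m : Cell) : prev_cell c m ≠ c := by
  unfold prev_cell
  split <;>
    · intro he
      obtain ⟨h1, h2⟩ := Prod.mk.injEq .. ▸ he
      omega

theorem prev_next (c m : Cell) : prev_cell (next_cell c m) m = c := by
  unfold prev_cell next_cell
  split <;> simp_all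

theorem prevp_eq_iff (p : Cell × Cell) (c m : Cell) :
    prevp p = (c, m) ↔ p = (next_cell c m, m) := by
  obtain ⟨a, b⟩ := p
  simp only [prevp, Prod.mk.injEq]
  constructor
  · rintro ⟨h1, h2⟩
    subst h2
    refine ⟨?_, rfl⟩
    subst h1
    unfold prev_cell next_cell
    rcases hb : (b.2 == 0) with _ | _ <;> simp
  · rintro ⟨h1, h2⟩
    subst h1; subst h2
    exact ⟨prev_next c b, rfl⟩

theorem countP_and_split {α : Type} (l : List α) (p q : α → Bool) :
    l.countP (fun x => p x && q x) + l.countP (fun x => p x && !q x) = l.countP p := by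
  induction l with
  | nil => rfl
  | cons x l ih =>
    simp only [List.countP_cons]
    rcases hp : p x <;> rcases hq : q x <;> simp [hp, hq] <;> omega

theorem countP_and_single {α : Type} [DecidableEq α] (l : List α) (a : α) (p : α → Bool)
    (hnd : l.Nodup) :
    l.countP (fun x => p x && decide (x = a)) = if a ∈ l ∧ p a = true then 1 else 0 := by
  induction l with
  | nil => simp
  | cons x l ih =>
    rw [List.nodup_cons] at hnd
    rcases hnd with ⟨hx, hl⟩
    by_cases hxa : x = a
    · subst hxa
      rcases hp : p x
      · simp [List.countP_cons, hp, ih hl, hx]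
      · have : l.countP (fun y => p y && decide (y = x)) = 0 := by
          rw [ih hl]
          simp [hx]
        simp [List.countP_cons, hp, this]
    · have hd : decide (x = a) = false := by simp [hxa]
      simp only [List.countP_cons, hd, Bool.and_false, cond_false, if_false]
      rw [ih hl]
      simp [Ne.symm hxa]

theorem LEcnt_append {E : List (Cell × Cell)} {c m : Cell}
    (hnd : E.Nodup) (hfr : (c, m) ∉ E) :
    LEcnt (E ++ [(c, m)])
      = LEcnt E + (if (prev_cell c m, m) ∈ E then 0 else 1)
          - (if (next_cell c m, m) ∈ E then 1 else 0) := by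
  have hpe : ((prev_cell c m, m) : Cell × Cell) ≠ (c, m) := by
    intro h
    exact prev_cell_ne c m (congrArg Prod.fst h)
  have hcongr : E.countP (fun p => !(decide (prevp p ∈ E ++ [(c, m)])))
      = E.countP (fun p => (!(decide (prevp p ∈ E))) && !(decide (p = (next_cell c m, m)))) := by
    apply List.countP_congr
    intro p _
    have : (prevp p ∈ E ++ [(c, m)]) ↔ (prevp p ∈ E ∨ p = (next_cell c m, m)) := by
      rw [List.mem_append, List.mem_singleton, prevp_eq_iff]
    simp [this, not_or]
  have hsplit := countP_and_split E (fun p => !(decide (prevp p ∈ E)))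
    (fun p => decide (p = (next_cell c m, m)))
  have hsingle : E.countP (fun p => (!(decide (prevp p ∈ E))) && decide (p = (next_cell c m, m)))
      = if (next_cell c m, m) ∈ E then 1 else 0 := by
    rw [countP_and_single E ((next_cell c m, m)) _ hnd]
    have hP : (!(decide (prevp ((next_cell c m), m) ∈ E))) = true := by
      simp only [prevp, prev_next]
      simpa using hfr
    by_cases hmem : ((next_cell c m, m) : Cell × Cell) ∈ E
    · simp [hmem, hP]
    · simp [hmem]
  have hlast : List.countP (fun p => !(decide (prevp p ∈ E ++ [(c, m)]))) [(c, m)]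
      = if (prev_cell c m, m) ∈ E then 0 else 1 := by
    have : (prevp (c, m) ∈ E ++ [(c, m)]) ↔ ((prev_cell c m, m) ∈ E) := by
      rw [prevp, List.mem_append, List.mem_singleton]
      simp [hpe]
    simp only [List.countP_cons, List.countP_nil, this]
    by_cases hm2 : ((prev_cell c m, m) : Cell × Cell) ∈ E <;> simp [hm2]
  rw [LEcnt, LEcnt, List.countP_append, hcongr, hlast]
  rw [hsingle] at hsplit
  by_cases hpm : ((prev_cell c m, m) : Cell × Cell) ∈ E <;>
    by_cases hnm : ((next_cell c m, m) : Cell × Cell) ∈ E <;>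
    · simp only [hpm, hnm, if_true, if_false] at *
      omega

-- ---- the dict update of evaluate_edge ----
theorem emIns_mem (em : EMap) (ek : Int) (e : Int × Cell) (k w : Int) (mv : Cell) :
    PySem.Set.contains
        ((em.insert ek (PySem.Set.add (em.getD ek PySem.Set.empty) e)).getD k PySem.Set.empty)
        (w, mv) = true
      ↔ (PySem.Set.contains (em.getD k PySem.Set.empty) (w, mv) = true ∨ (k = ek ∧ (w, mv) = e)) := by
  rw [PySem.Dict.getD_insert]
  by_cases hk : k = ek
  · subst hk
    simp only [if_true, PySem.Set.contains_iff, PySem.Set.mem_add]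
    tauto
  · simp [hk]

theorem em_branches_eq (em : EMap) (ek : Int) (e : Int × Cell) :
    (if em.contains ek
     then em.insert ek (PySem.Set.add (em.getD ek PySem.Set.empty) e)
     else em.insert ek (PySem.Set.ofList [e]))
    = em.insert ek (PySem.Set.add (em.getD ek PySem.Set.empty) e) := by
  rcases h : em.contains ek with _ | _
  · rw [if_neg (by simp [h])]
    rw [PySem.Dict.getD_of_not_contains em PySem.Set.empty h]
    rfl
  · rw [if_pos (by simp [h])]

def ekOf (m c : Cell) : Int := if isXm m then c.1 else c.2
def evOf (m c : Cell) : Int := if isXm m then c.2 else c.1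

theorem next_cell_ne (c m : Cell) : next_cell c m ≠ c := by
  unfold next_cell
  split <;>
    · intro he
      obtain ⟨h1, h2⟩ := Prod.mk.injEq .. ▸ he
      omega

theorem movesA_elim {m : Cell} (hm : m ∈ movesA) :
    m = (1, 0) ∨ m = (-1, 0) ∨ m = (0, 1) ∨ m = (0, -1) := by
  simpa [movesA] using hm

theorem encode_prev {m : Cell} (hm : m ∈ movesA) (c : Cell) :
    cellOf m (ekOf m c) (evOf m c - 1) = prev_cell c m := by
  rcases movesA_elim hm with rfl | rfl | rfl | rfl <;> rfl

theorem encode_next {m : Cell} (hm : m ∈ movesA) (c : Cell) :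
    cellOf m (ekOf m c) (evOf m c + 1) = next_cell c m := by
  rcases movesA_elim hm with rfl | rfl | rfl | rfl <;> rfl

theorem decode_eq {m : Cell} (hm : m ∈ movesA) (c : Cell) (k w : Int) :
    cellOf m k w = c ↔ (k = ekOf m c ∧ w = evOf m c) := by
  rcases movesA_elim hm with rfl | rfl | rfl | rfl <;>
    · simp [cellOf, ekOf, evOf, isXm, Prod.ext_iff]
      try tauto

theorem eval_edge_sim {c m : Cell} {ex ey : EMap}
    {E : List (Cell × Cell)} (hm : m ∈ movesA) (hchr : Chr ex ey E) (hfr : (c, m) ∉ E)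
    (hnd : E.Nodup) :
    (evaluate_edge c m ex ey).1 = LEcnt (E ++ [(c, m)]) - LEcnt E
      ∧ Chr (evaluate_edge c m ex ey).2.1 (evaluate_edge c m ex ey).2.2 (E ++ [(c, m)]) := by
  have hpne : ((prev_cell c m, m) : Cell × Cell) ≠ (c, m) := fun h =>
    prev_cell_ne c m (congrArg Prod.fst h)
  have hnne : ((next_cell c m, m) : Cell × Cell) ≠ (c, m) := fun h =>
    next_cell_ne c m (congrArg Prod.fst h)
  set em0 : EMap := if isXm m then ey else ex with hem0
  set em1 : EMap :=
    em0.insert (ekOf m c) (PySem.Set.add (em0.getD (ekOf m c) PySem.Set.empty) (evOf m c, m))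
    with hem1
  have heval : evaluate_edge c m ex ey =
      (let s := em1.getD (ekOf m c) PySem.Set.empty
       let hasL := PySem.Set.contains s (evOf m c - 1, m)
       let hasR := PySem.Set.contains s (evOf m c + 1, m)
       let delta : Int := if hasL && hasR then -1 else if hasL || hasR then 0 else 1
       if isXm m then (delta, ex, em1) else (delta, em1, ey)) := by
    rw [evaluate_edge]
    rw [show ([((1 : Int), (0 : Int)), (-1, 0)].contains m) = isXm m from rfl]
    rcases hx : isXm m with _ | _ <;>
      · simp only [hx, if_true, if_false, Bool.false_eq_true]
        rw [em_branches_eq]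
        simp only [hem1, hem0, ekOf, evOf, hx, if_true, if_false, Bool.false_eq_true]
        try rfl
  have hq : ∀ w : Int, PySem.Set.contains (em1.getD (ekOf m c) PySem.Set.empty) (w, m) = true
      ↔ ((cellOf m (ekOf m c) w, m) ∈ E ∨ w = evOf m c) := by
    intro w
    rw [hem1, emIns_mem]
    have h0 : PySem.Set.contains (em0.getD (ekOf m c) PySem.Set.empty) (w, m) = true
        ↔ (cellOf m (ekOf m c) w, m) ∈ E := hchr (ekOf m c) w m hm
    constructor
    · rintro (h | ⟨-, h⟩)
      · exact Or.inl (h0.1 h)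
      · obtain ⟨h1, -⟩ := Prod.mk.injEq .. ▸ h
        exact Or.inr h1
    · rintro (h | h)
      · exact Or.inl (h0.2 h)
      · subst h
        exact Or.inr ⟨rfl, rfl⟩
  have hLiff : PySem.Set.contains (em1.getD (ekOf m c) PySem.Set.empty) (evOf m c - 1, m) = true
      ↔ (prev_cell c m, m) ∈ E := by
    rw [hq, encode_prev hm]
    have : evOf m c - 1 ≠ evOf m c := by omega
    simp [this]
  have hRiff : PySem.Set.contains (em1.getD (ekOf m c) PySem.Set.empty) (evOf m c + 1, m) = true
      ↔ (next_cell c m, m) ∈ E := by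
    rw [hq, encode_next hm]
    have : evOf m c + 1 ≠ evOf m c := by omega
    simp [this]
  constructor
  · rw [LEcnt_append hnd hfr]
    have hδ : (evaluate_edge c m ex ey).1
        = (if PySem.Set.contains (em1.getD (ekOf m c) PySem.Set.empty) (evOf m c - 1, m)
              && PySem.Set.contains (em1.getD (ekOf m c) PySem.Set.empty) (evOf m c + 1, m)
           then (-1 : Int)
           else if PySem.Set.contains (em1.getD (ekOf m c) PySem.Set.empty) (evOf m c - 1, m)
              || PySem.Set.contains (em1.getD (ekOf m c) PySem.Set.empty) (evOf m c + 1, m)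
           then 0 else 1) := by
      rw [heval]
      rcases hx : isXm m with _ | _ <;> simp [hx]
    have hLval : PySem.Set.contains (em1.getD (ekOf m c) PySem.Set.empty) (evOf m c - 1, m)
        = decide ((prev_cell c m, m) ∈ E) := by
      by_cases hp : ((prev_cell c m, m) : Cell × Cell) ∈ E
      · rw [hLiff.2 hp]; simp [hp]
      · simp only [hp, decide_false]
        rcases hcl : PySem.Set.contains (em1.getD (ekOf m c) PySem.Set.empty) (evOf m c - 1, m)
          with _ | _
        · rfl
        · exact absurd (hLiff.1 hcl) hp
    have hRval : PySem.Set.contains (em1.getD (ekOf m c) PySem.Set.empty) (evOf m c + 1, m)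
        = decide ((next_cell c m, m) ∈ E) := by
      by_cases hn : ((next_cell c m, m) : Cell × Cell) ∈ E
      · rw [hRiff.2 hn]; simp [hn]
      · simp only [hn, decide_false]
        rcases hcl : PySem.Set.contains (em1.getD (ekOf m c) PySem.Set.empty) (evOf m c + 1, m)
          with _ | _
        · rfl
        · exact absurd (hRiff.1 hcl) hn
    rw [hδ, hLval, hRval]
    by_cases hp : ((prev_cell c m, m) : Cell × Cell) ∈ E <;>
      by_cases hn : ((next_cell c m, m) : Cell × Cell) ∈ E <;>
      simp [hp, hn]
  · intro k w m' hm'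
    have hsel : (if isXm m' then (evaluate_edge c m ex ey).2.2
        else (evaluate_edge c m ex ey).2.1)
        = (if isXm m' = isXm m then em1 else (if isXm m' then ey else ex)) := by
      rw [heval]
      rcases hx : isXm m with _ | _ <;> rcases hx' : isXm m' with _ | _ <;> simp [hx, hx']
    rw [hsel]
    by_cases hxe : isXm m' = isXm m
    · rw [if_pos hxe, hem1, emIns_mem]
      have h0 : PySem.Set.contains (em0.getD k PySem.Set.empty) (w, m') = true
          ↔ (cellOf m' k w, m') ∈ E := by
        rw [hem0, ← hxe]
        exact hchr k w m' hm'
      rw [List.mem_append, List.mem_singleton, h0]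
      constructor
      · rintro (h | ⟨h1, h2⟩)
        · exact Or.inl h
        · obtain ⟨h2, h3⟩ := Prod.mk.injEq .. ▸ h2
          subst h3
          refine Or.inr ?_
          rw [Prod.mk.injEq]
          refine ⟨?_, rfl⟩
          rw [decode_eq hm c k w]
          exact ⟨h1, h2⟩
      · rintro (h | h)
        · exact Or.inl h
        · obtain ⟨h1, h2⟩ := Prod.mk.injEq .. ▸ h
          subst h2
          rw [decode_eq hm c k w] at h1
          exact Or.inr ⟨h1.1, by rw [Prod.mk.injEq]; exact ⟨h1.2, rfl⟩⟩
    · rw [if_neg hxe]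
      have hmne : m' ≠ m := fun h => hxe (by rw [h])
      have h0 : PySem.Set.contains ((if isXm m' then ey else ex).getD k PySem.Set.empty) (w, m')
          = true ↔ (cellOf m' k w, m') ∈ E := hchr k w m' hm'
      rw [h0, List.mem_append, List.mem_singleton]
      have : ((cellOf m' k w, m') : Cell × Cell) ≠ (c, m) := fun h =>
        hmne (congrArg Prod.snd h)
      simp [this]

-- ---- A's border test is the ghost border test ----
theorem acond_eq_border (grid : List (List Char)) (pt : Char) (c m : Cell) :
    (!(is_valid_space (c.1 + m.1, c.2 + m.2) grid)
      || !(PySem.List.pyGetD (PySem.List.pyGetD grid (c.1 + m.1) []) (c.2 + m.2) ' ' == pt))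
    = borderCk grid pt c m := by
  rw [borderCk, same_plotG, is_valid_space]
  rw [show decide ((c.1 + m.1, c.2 + m.2).1 > -1) = decide (0 ≤ (c.1 + m.1, c.2 + m.2).1) from
    decide_eq_decide.2 (by omega)]
  rw [show decide ((c.1 + m.1, c.2 + m.2).2 > -1) = decide (0 ≤ (c.1 + m.1, c.2 + m.2).2) from
    decide_eq_decide.2 (by omega)]
  simp only [Bool.not_and, Bool.not_or]

-- ---- B's neighbour pushes, indexed by A's move list ----
def pushM (grid : List (List Char)) (pt : Char) (c : Cell)
    (st : List Cell × PySem.Set Cell) (m : Cell) : List Cell × PySem.Set Cell :=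
  pushB grid (PySem.List.len grid) (PySem.List.len (PySem.List.pyGetD grid 0 [])) pt st
    (c.1 + m.1) (c.2 + m.2)

theorem pushM_eq (grid : List (List Char)) (pt : Char) (c : Cell)
    (st : List Cell × PySem.Set Cell) (m : Cell) :
    pushM grid pt c st m
      = (if same_plotG grid (c.1 + m.1, c.2 + m.2) pt
            && !(PySem.Set.contains st.2 (c.1 + m.1, c.2 + m.2)) then
          (st.1 ++ [(c.1 + m.1, c.2 + m.2)], PySem.Set.add st.2 (c.1 + m.1, c.2 + m.2))
        else st) := rfl

theorem chain_eq (grid : List (List Char)) (pt : Char) (c : Cell)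
    (reg : List Cell) (v : PySem.Set Cell) :
    (let rows := PySem.List.len grid
     let cols := PySem.List.len (PySem.List.pyGetD grid 0 [])
     let st1 := pushB grid rows cols pt (reg, v) (c.1 + 1) c.2
     let st2 := pushB grid rows cols pt st1 (c.1 - 1) c.2
     let st3 := pushB grid rows cols pt st2 c.1 (c.2 + 1)
     pushB grid rows cols pt st3 c.1 (c.2 - 1))
      = movesA.foldl (pushM grid pt c) (reg, v) := by
  simp only [movesA, List.foldl, pushM]
  norm_num [sub_eq_add_neg]

-- ---- the per-cell fold: A's stepA fold against B's push fold ----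
theorem foldA_sim {grid : List (List Char)} {pt : Char} {c : Cell} :
    ∀ (M : List Cell), (∀ m ∈ M, m ∈ movesA) → M.Nodup →
    ∀ (Rc q : List Cell) v s ex ey E, (∀ m ∈ M, (c, m) ∉ E) → E.Nodup → Chr ex ey E →
      s = LEcnt E →
    (M.foldl (pushM grid pt c) (Rc ++ q, v)).1
        = Rc ++ (M.foldl (stepA grid pt c) (q, v, s, ex, ey)).1
    ∧ (M.foldl (pushM grid pt c) (Rc ++ q, v)).2
        = (M.foldl (stepA grid pt c) (q, v, s, ex, ey)).2.1
    ∧ (M.foldl (stepA grid pt c) (q, v, s, ex, ey)).2.2.1 = LEcnt (E ++ pairsOf grid pt c M)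
    ∧ Chr (M.foldl (stepA grid pt c) (q, v, s, ex, ey)).2.2.2.1
          (M.foldl (stepA grid pt c) (q, v, s, ex, ey)).2.2.2.2 (E ++ pairsOf grid pt c M)
    ∧ (E ++ pairsOf grid pt c M).Nodup := by
  intro M
  induction M with
  | nil =>
    intro _ _ Rc q v s ex ey E hfresh hEnd hchr hs
    rw [show pairsOf grid pt c [] = [] from rfl, List.append_nil]
    exact ⟨rfl, rfl, hs, hchr, hEnd⟩
  | cons m M ih =>
    intro hsub hndM Rc q v s ex ey E hfresh hEnd hchr hs
    have hmA : m ∈ movesA := hsub m List.mem_cons_self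
    have hndM' : M.Nodup := (List.nodup_cons.1 hndM).2
    have hmnotM : m ∉ M := (List.nodup_cons.1 hndM).1
    have hsub' : ∀ m' ∈ M, m' ∈ movesA := fun m' h => hsub m' (List.mem_cons_of_mem m h)
    simp only [List.foldl_cons]
    by_cases hbd : borderCk grid pt c m = true
    · -- a border move: A records an edge, B does nothing
      have hbA : (!(is_valid_space (c.1 + m.1, c.2 + m.2) grid)
          || !(PySem.List.pyGetD (PySem.List.pyGetD grid (c.1 + m.1) []) (c.2 + m.2) ' ' == pt))
          = true := by rw [acond_eq_border]; exact hbd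
      have hsp : same_plotG grid (c.1 + m.1, c.2 + m.2) pt = false := by
        have := hbd
        rw [borderCk] at this
        rcases h : same_plotG grid (c.1 + m.1, c.2 + m.2) pt with _ | _
        · rfl
        · rw [h] at this; cases this
      have hstA : stepA grid pt c (q, v, s, ex, ey) m
          = (q, v, s + (evaluate_edge c m ex ey).1, (evaluate_edge c m ex ey).2.1,
             (evaluate_edge c m ex ey).2.2) := by
        simp only [stepA]; rw [hbA]; simp
      have hstB : pushM grid pt c (Rc ++ q, v) m = (Rc ++ q, v) := by
        rw [pushM_eq, hsp]; simp
      rw [hstA, hstB]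
      obtain ⟨hδ, hchr'⟩ := eval_edge_sim hmA hchr (hfresh m List.mem_cons_self) hEnd
      have hfr : ((c, m) : Cell × Cell) ∉ E := hfresh m List.mem_cons_self
      have hEnd' : (E ++ [(c, m)]).Nodup := by
        refine hEnd.append (List.nodup_singleton _) ?_
        intro x hx hx'
        rw [List.mem_singleton] at hx'
        subst hx'
        exact hfr hx
      have hfresh' : ∀ m' ∈ M, ((c, m') : Cell × Cell) ∉ E ++ [(c, m)] := by
        intro m' hm' hmem
        rcases List.mem_append.1 hmem with h | h
        · exact hfresh m' (List.mem_cons_of_mem m hm') h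
        · rw [List.mem_singleton] at h
          obtain ⟨-, h2⟩ := Prod.mk.injEq .. ▸ h
          exact hmnotM (h2 ▸ hm')
      have hs' : s + (evaluate_edge c m ex ey).1 = LEcnt (E ++ [(c, m)]) := by
        rw [hδ, hs]; ring
      have := ih hsub' hndM' Rc q v (s + (evaluate_edge c m ex ey).1)
        (evaluate_edge c m ex ey).2.1 (evaluate_edge c m ex ey).2.2 (E ++ [(c, m)])
        hfresh' hEnd' hchr' hs'
      have hpc : pairsOf grid pt c (m :: M) = (c, m) :: pairsOf grid pt c M := by
        simp [pairsOf, hbd]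
      rw [hpc]
      simpa [List.append_assoc] using this
    · -- not a border: queue/visited updates agree, edges unchanged
      have hbF : borderCk grid pt c m = false := by
        rcases h : borderCk grid pt c m with _ | _
        · rfl
        · exact absurd h hbd
      have hbA : (!(is_valid_space (c.1 + m.1, c.2 + m.2) grid)
          || !(PySem.List.pyGetD (PySem.List.pyGetD grid (c.1 + m.1) []) (c.2 + m.2) ' ' == pt))
          = false := by rw [acond_eq_border]; exact hbF
      have hsp : same_plotG grid (c.1 + m.1, c.2 + m.2) pt = true := by
        rw [borderCk] at hbF
        rcases h : same_plotG grid (c.1 + m.1, c.2 + m.2) pt with _ | _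
        · rw [h] at hbF; cases hbF
        · rfl
      have hpc : pairsOf grid pt c (m :: M) = pairsOf grid pt c M := by
        simp [pairsOf, hbF]
      rw [hpc]
      rcases hct : PySem.Set.contains v (c.1 + m.1, c.2 + m.2) with _ | _
      · have hstA : stepA grid pt c (q, v, s, ex, ey) m
            = (q ++ [(c.1 + m.1, c.2 + m.2)], PySem.Set.add v (c.1 + m.1, c.2 + m.2), s, ex, ey) := by
          simp only [stepA]; rw [hbA, hct]; simp
        have hstB : pushM grid pt c (Rc ++ q, v) m
            = (Rc ++ (q ++ [(c.1 + m.1, c.2 + m.2)]), PySem.Set.add v (c.1 + m.1, c.2 + m.2)) := by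
          rw [pushM_eq, hsp, hct]
          simp [List.append_assoc]
        rw [hstA, hstB]
        exact ih hsub' hndM' Rc _ _ s ex ey E (fun m' h => hfresh m' (List.mem_cons_of_mem m h))
          hEnd hchr hs
      · have hstA : stepA grid pt c (q, v, s, ex, ey) m = (q, v, s, ex, ey) := by
          simp only [stepA]; rw [hbA, hct]; simp
        have hstB : pushM grid pt c (Rc ++ q, v) m = (Rc ++ q, v) := by
          rw [pushM_eq, hsp, hct]; simp
        rw [hstA, hstB]
        exact ih hsub' hndM' Rc q v s ex ey E (fun m' h => hfresh m' (List.mem_cons_of_mem m h))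
          hEnd hchr hs

-- ---- facts about the queue components of A's fold needed for the invariants ----
theorem foldQ_inv {grid : List (List Char)} {pt : Char} {c : Cell} :
    ∀ (M : List Cell) (q : List Cell) (v : PySem.Set Cell) s ex ey,
    (∀ d, d ∈ v → d ∈ (M.foldl (stepA grid pt c) (q, v, s, ex, ey)).2.1)
    ∧ (∀ d ∈ (M.foldl (stepA grid pt c) (q, v, s, ex, ey)).1,
        d ∈ q ∨ (d ∉ v ∧ d ∈ cellsOf grid))
    ∧ (q.Nodup → (∀ d ∈ q, d ∈ v) →
        ((M.foldl (stepA grid pt c) (q, v, s, ex, ey)).1.Nodup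
          ∧ ∀ d ∈ (M.foldl (stepA grid pt c) (q, v, s, ex, ey)).1,
              d ∈ (M.foldl (stepA grid pt c) (q, v, s, ex, ey)).2.1)) := by
  intro M
  induction M with
  | nil =>
    intro q v s ex ey
    exact ⟨fun d h => h, fun d h => Or.inl h, fun hnd hqv => ⟨hnd, hqv⟩⟩
  | cons m M ih =>
    intro q v s ex ey
    simp only [List.foldl_cons]
    rcases hb : (!(is_valid_space (c.1 + m.1, c.2 + m.2) grid)
        || !(PySem.List.pyGetD (PySem.List.pyGetD grid (c.1 + m.1) []) (c.2 + m.2) ' ' == pt))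
        with _ | _
    · rcases hct : PySem.Set.contains v (c.1 + m.1, c.2 + m.2) with _ | _
      · -- fresh same-plot neighbour
        have hval : is_valid_space (c.1 + m.1, c.2 + m.2) grid = true := by
          rcases h : is_valid_space (c.1 + m.1, c.2 + m.2) grid with _ | _
          · rw [h] at hb; simp at hb
          · rfl
        have hnv : (c.1 + m.1, c.2 + m.2) ∉ v := by
          intro h
          rw [(PySem.Set.contains_iff v _).2 h] at hct
          cases hct
        rw [show stepA grid pt c (q, v, s, ex, ey) m
            = (q ++ [(c.1 + m.1, c.2 + m.2)], PySem.Set.add v (c.1 + m.1, c.2 + m.2), s, ex, ey) by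
          simp only [stepA]; rw [hb, hct]; simp]
        obtain ⟨ih1, ih2, ih3⟩ := ih (q ++ [(c.1 + m.1, c.2 + m.2)])
          (PySem.Set.add v (c.1 + m.1, c.2 + m.2)) s ex ey
        refine ⟨fun d h => ih1 d ((PySem.Set.mem_add ..).2 (Or.inl h)), ?_, ?_⟩
        · intro d h
          rcases ih2 d h with h2 | h2
          · rcases List.mem_append.1 h2 with h3 | h3
            · exact Or.inl h3
            · rw [List.mem_singleton] at h3
              subst h3
              exact Or.inr ⟨hnv, valid_mem_cells hval⟩
          · exact Or.inr ⟨fun hv => h2.1 ((PySem.Set.mem_add ..).2 (Or.inl hv)), h2.2⟩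
        · intro hnd hqv
          have hnpq : (c.1 + m.1, c.2 + m.2) ∉ q := fun h => hnv (hqv _ h)
          refine ih3 ?_ ?_
          · refine hnd.append (List.nodup_singleton _) ?_
            intro x hx hx'
            rw [List.mem_singleton] at hx'
            subst hx'
            exact hnpq hx
          · intro d hd
            rcases List.mem_append.1 hd with h3 | h3
            · exact (PySem.Set.mem_add ..).2 (Or.inl (hqv d h3))
            · rw [List.mem_singleton] at h3
              subst h3
              exact (PySem.Set.mem_add ..).2 (Or.inr rfl)
      · rw [show stepA grid pt c (q, v, s, ex, ey) m = (q, v, s, ex, ey) by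
          simp only [stepA]; rw [hb, hct]; simp]
        exact ih q v s ex ey
    · rw [show stepA grid pt c (q, v, s, ex, ey) m
          = (q, v, s + (evaluate_edge c m ex ey).1, (evaluate_edge c m ex ey).2.1,
             (evaluate_edge c m ex ey).2.2) by
        simp only [stepA]; rw [hb]; simp]
      exact ih q v _ _ _

theorem mem_pairsOf {grid : List (List Char)} {pt : Char} {c d m : Cell} {M : List Cell} :
    (d, m) ∈ pairsOf grid pt c M ↔ d = c ∧ m ∈ M ∧ borderCk grid pt c m = true := by
  simp only [pairsOf, List.mem_filterMap]
  constructor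
  · rintro ⟨m', hm', h⟩
    by_cases hb : borderCk grid pt c m' = true
    · rw [if_pos hb] at h
      obtain ⟨h1, h2⟩ := Prod.mk.injEq .. ▸ (Option.some.injEq .. ▸ h)
      subst h1; subst h2
      exact ⟨rfl, hm', hb⟩
    · rw [if_neg hb] at h
      cases h
  · rintro ⟨h1, h2, h3⟩
    subst h1
    exact ⟨m, h2, by rw [if_pos h3]⟩

theorem mem_Epairs {grid : List (List Char)} {pt : Char} {R : List Cell} {d m : Cell} :
    (d, m) ∈ Epairs grid pt R ↔ d ∈ R ∧ m ∈ movesA ∧ borderCk grid pt d m = true := by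
  simp only [Epairs, List.mem_flatMap]
  constructor
  · rintro ⟨c, hc, h⟩
    rw [mem_pairsOf] at h
    obtain ⟨h1, h2, h3⟩ := h
    subst h1
    exact ⟨hc, h2, h3⟩
  · rintro ⟨h1, h2, h3⟩
    exact ⟨d, h1, mem_pairsOf.2 ⟨rfl, h2, h3⟩⟩

theorem Epairs_append (grid : List (List Char)) (pt : Char) (R : List Cell) (c : Cell) :
    Epairs grid pt (R ++ [c]) = Epairs grid pt R ++ pairsOf grid pt c movesA := by
  simp [Epairs]

theorem floodB_at_end (grid : List (List Char)) (rows cols : Int) (pt : Char)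
    (fuel : Nat) (R : List Cell) (v : PySem.Set Cell) :
    floodB grid rows cols pt fuel R (R.length : Int) v = (R, v) := by
  cases fuel with
  | zero => rfl
  | succ f =>
    have hnone : PySem.List.pyGet? R (R.length : Int) = none := by
      rw [PySem.List.pyGet?_eq_none_iff]
      simp [PySem.Raise.InRange]
    simp only [floodB, hnone]

theorem cellsOf_length (grid : List (List Char)) :
    (cellsOf grid).length = grid.length * (PySem.List.pyGetD grid 0 []).length := by
  rw [cellsOf]
  rw [List.length_flatMap]
  have : ∀ y : Int, ((PySem.List.pyRange 0 (PySem.List.len (PySem.List.pyGetD grid 0 [])) 1).map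
      (fun x => ((y, x) : Cell))).length = (PySem.List.pyGetD grid 0 []).length := by
    intro y
    rw [List.length_map, PySem.List.length_pyRange_one]
    simp [PySem.List.len_eq]
  simp only [this, List.map_const']
  rw [List.sum_replicate, smul_eq_mul, PySem.List.length_pyRange_one]
  simp [PySem.List.len_eq]

-- ---- the BFS / flood-fill simulation ----
theorem bfs_sim {grid : List (List Char)} {pt : Char} {hd : Cell} :
    ∀ (N : Nat) (q : List Cell) (v : PySem.Set Cell) (a s : Int) (ex ey : EMap)
      (R : List Cell) (fuel : Nat), 4 * unseen grid v + q.length = N →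
    q.Nodup → (∀ d ∈ q, d ∈ v) → (∀ d ∈ q, d ∉ R) → R.Nodup → (∀ d ∈ R, d ∈ v) →
    Chr ex ey (Epairs grid pt R) → s = LEcnt (Epairs grid pt R) → (Epairs grid pt R).Nodup →
    (∀ d ∈ R ++ q, d ∈ hd :: cellsOf grid) →
    (cellsOf grid).length + 1 ≤ fuel + R.length →
    bfsA grid pt q v a s ex ey
      = (a + (((floodB grid (PySem.List.len grid)
              (PySem.List.len (PySem.List.pyGetD grid 0 [])) pt fuel (R ++ q)
              (R.length : Int) v).1.length : Int)) - (R.length : Int),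
         LEcnt (Epairs grid pt (floodB grid (PySem.List.len grid)
              (PySem.List.len (PySem.List.pyGetD grid 0 [])) pt fuel (R ++ q)
              (R.length : Int) v).1),
         (floodB grid (PySem.List.len grid)
              (PySem.List.len (PySem.List.pyGetD grid 0 [])) pt fuel (R ++ q)
              (R.length : Int) v).2)
    ∧ (floodB grid (PySem.List.len grid)
              (PySem.List.len (PySem.List.pyGetD grid 0 [])) pt fuel (R ++ q)
              (R.length : Int) v).1.Nodup := by
  intro N
  induction N using Nat.strong_induction_on with
  | _ N ihN =>
    intro q v a s ex ey R fuel hN h1 h2 h3 h4 h5 hchr hs hEnd hmem hfuel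
    match q with
    | [] =>
      rw [show bfsA grid pt [] v a s ex ey = (a, s, v) from by rw [bfsA]]
      rw [List.append_nil, floodB_at_end]
      refine ⟨?_, h4⟩
      rw [hs]
      have : a + (R.length : Int) - (R.length : Int) = a := by ring
      rw [this]
    | c :: rest =>
      have hcR : c ∉ R := h3 c List.mem_cons_self
      have hcv : c ∈ v := h2 c List.mem_cons_self
      have hrestnd : rest.Nodup := (List.nodup_cons.1 h1).2
      have hcrest : c ∉ rest := (List.nodup_cons.1 h1).1
      have hrestv : ∀ d ∈ rest, d ∈ v := fun d h => h2 d (List.mem_cons_of_mem c h)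
      have hfresh : ∀ m ∈ movesA, ((c, m) : Cell × Cell) ∉ Epairs grid pt R := by
        intro m _ hmem'
        exact hcR (mem_Epairs.1 hmem').1
      -- fuel is positive: R ++ c :: rest is a nodup sublist of hd :: cellsOf grid
      have hndRq : (R ++ c :: rest).Nodup := by
        refine h4.append h1 ?_
        intro x hx hx'
        rcases List.mem_cons.1 hx' with h | h
        · exact hcR (h ▸ hx)
        · exact h3 x (List.mem_cons_of_mem c h) hx
      have hlensub : (R ++ c :: rest).length ≤ (hd :: cellsOf grid).length :=
        (hndRq.subperm hmem).length_le
      have hfuelpos : 1 ≤ fuel := by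
        simp only [List.length_append, List.length_cons] at hlensub
        omega
      obtain ⟨f, rfl⟩ : ∃ f, fuel = f + 1 := ⟨fuel - 1, by omega⟩
      -- unfold one step of A
      rw [show bfsA grid pt (c :: rest) v a s ex ey
          = bfsA grid pt (movesA.foldl (stepA grid pt c) (rest, v, s, ex, ey)).1
              (movesA.foldl (stepA grid pt c) (rest, v, s, ex, ey)).2.1 (a + 1)
              (movesA.foldl (stepA grid pt c) (rest, v, s, ex, ey)).2.2.1
              (movesA.foldl (stepA grid pt c) (rest, v, s, ex, ey)).2.2.2.1
              (movesA.foldl (stepA grid pt c) (rest, v, s, ex, ey)).2.2.2.2 from by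
        conv_lhs => rw [bfsA]]
      -- unfold one step of B
      have hget : PySem.List.pyGet? (R ++ c :: rest) (R.length : Int) = some c :=
        PySem.List.pyGet?_append_length ..
      rw [show floodB grid (PySem.List.len grid)
              (PySem.List.len (PySem.List.pyGetD grid 0 [])) pt (f + 1) (R ++ c :: rest)
              (R.length : Int) v
          = floodB grid (PySem.List.len grid)
              (PySem.List.len (PySem.List.pyGetD grid 0 [])) pt f
              (movesA.foldl (pushM grid pt c) (R ++ c :: rest, v)).1
              ((R.length : Int) + 1)
              (movesA.foldl (pushM grid pt c) (R ++ c :: rest, v)).2 from by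
        conv_lhs => rw [floodB]
        rw [hget]
        rw [← chain_eq grid pt c (R ++ c :: rest) v]]
      have hRcq : R ++ c :: rest = (R ++ [c]) ++ rest := by simp
      have hfold := foldA_sim (grid := grid) (pt := pt) (c := c) movesA
        (fun m h => h) (by decide) (R ++ [c]) rest v s ex ey (Epairs grid pt R)
        hfresh hEnd hchr hs
      have hmeas := stepA_measure grid pt c movesA rest v s ex ey
      have hqinv := foldQ_inv (grid := grid) (pt := pt) (c := c) movesA rest v s ex ey
      set stA := movesA.foldl (stepA grid pt c) (rest, v, s, ex, ey) with hstA
      obtain ⟨hf1, hf2, hf3, hf4, hf5⟩ := hfold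
      obtain ⟨hb1, hb2, hb3⟩ := hqinv
      rw [hRcq, hf1, hf2]
      have hEap : Epairs grid pt R ++ pairsOf grid pt c movesA = Epairs grid pt (R ++ [c]) := by
        rw [Epairs_append]
      have hlt : 4 * unseen grid stA.2.1 + stA.1.length < N := by
        rw [← hN]
        simp only [List.length_cons]
        omega
      obtain ⟨hq'nd, hq'v⟩ := hb3 hrestnd hrestv
      have hq'R : ∀ d ∈ stA.1, d ∉ R ++ [c] := by
        intro d hd hmem'
        rcases List.mem_append.1 hmem' with hm | hm
        · rcases hb2 d hd with h | h
          · exact h3 d (List.mem_cons_of_mem c h) hm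
          · exact h.1 (h5 d hm)
        · rw [List.mem_singleton] at hm
          subst hm
          rcases hb2 d hd with h | h
          · exact hcrest h
          · exact h.1 hcv
      have hR'nd : (R ++ [c]).Nodup := by
        refine h4.append (List.nodup_singleton _) ?_
        intro x hx hx'
        rw [List.mem_singleton] at hx'
        subst hx'
        exact hcR hx
      have hR'v : ∀ d ∈ R ++ [c], d ∈ stA.2.1 := by
        intro d hd
        rcases List.mem_append.1 hd with hm | hm
        · exact hb1 d (h5 d hm)
        · rw [List.mem_singleton] at hm
          subst hm
          exact hb1 d hcv
      have hchr' : Chr stA.2.2.2.1 stA.2.2.2.2 (Epairs grid pt (R ++ [c])) := by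
        rw [← hEap]; exact hf4
      have hs' : stA.2.2.1 = LEcnt (Epairs grid pt (R ++ [c])) := by
        rw [← hEap]; exact hf3
      have hEnd' : (Epairs grid pt (R ++ [c])).Nodup := by
        rw [← hEap]; exact hf5
      have hmem' : ∀ d ∈ (R ++ [c]) ++ stA.1, d ∈ hd :: cellsOf grid := by
        intro d hdm
        rcases List.mem_append.1 hdm with hm | hm
        · refine hmem d ?_
          rcases List.mem_append.1 hm with h | h
          · exact List.mem_append.2 (Or.inl h)
          · rw [List.mem_singleton] at h
            subst h
            exact List.mem_append.2 (Or.inr List.mem_cons_self)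
        · rcases hb2 d hm with h | h
          · exact hmem d (List.mem_append.2 (Or.inr (List.mem_cons_of_mem c h)))
          · exact List.mem_cons_of_mem hd h.2
      have hfuel' : (cellsOf grid).length + 1 ≤ f + (R ++ [c]).length := by
        simp only [List.length_append, List.length_cons, List.length_nil]
        omega
      have hlenc : ((R.length : Int) + 1) = (((R ++ [c]).length : Nat) : Int) := by
        simp
      rw [hlenc]
      have hrec := ihN _ hlt stA.1 stA.2.1 (a + 1) stA.2.2.1 stA.2.2.2.1 stA.2.2.2.2
        (R ++ [c]) f rfl hq'nd hq'v hq'R hR'nd hR'v hchr' hs' hEnd' hmem' hfuel'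
      obtain ⟨hrec1, hrec2⟩ := hrec
      refine ⟨?_, hrec2⟩
      rw [hrec1]
      have harith : (a + 1) + (((floodB grid (PySem.List.len grid)
              (PySem.List.len (PySem.List.pyGetD grid 0 [])) pt f ((R ++ [c]) ++ stA.1)
              (((R ++ [c]).length : Nat) : Int) stA.2.1).1.length : Int))
            - (((R ++ [c]).length : Nat) : Int)
          = a + (((floodB grid (PySem.List.len grid)
              (PySem.List.len (PySem.List.pyGetD grid 0 [])) pt f ((R ++ [c]) ++ stA.1)
              (((R ++ [c]).length : Nat) : Int) stA.2.1).1.length : Int)) - (R.length : Int) := by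
        simp only [List.length_append, List.length_cons, List.length_nil]
        push_cast
        ring
      rw [harith]

-- ---- B's corner count equals the left-end count of A's edges ----
def cornerCnt (grid : List (List Char)) (pt : Char) (region : List Cell)
    (rs : PySem.Set Cell) : Int :=
  region.foldl (fun acc c =>
    movesA.foldl (fun acc2 m =>
      if !(same_plotG grid (c.1 + m.1, c.2 + m.2) pt)
          && (!(PySem.Set.contains rs (prev_cell c m))
              || same_plotG grid ((prev_cell c m).1 + m.1, (prev_cell c m).2 + m.2) pt)
      then acc2 + 1 else acc2) acc) 0

theorem sidesB_eq_cornerCnt (grid : List (List Char)) (pt : Char) (region : List Cell)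
    (rs : PySem.Set Cell) :
    sidesB grid (PySem.List.len grid) (PySem.List.len (PySem.List.pyGetD grid 0 [])) pt
        region rs = cornerCnt grid pt region rs := by
  rw [sidesB, cornerCnt]
  congr 1
  funext acc c
  rw [show ([((1 : Int), (0 : Int)), (-1, 0), (0, 1), (0, -1)] : List Cell) = movesA from rfl]
  congr 1
  funext a2 m
  have hprev : prevB c m.1 m.2 = prev_cell c m := rfl
  rw [hprev, spB_canon, spB_canon]
  rcases hb : same_plotG grid (c.1 + m.1, c.2 + m.2) pt with _ | _ <;> simp [hb]

theorem countP_pairsOf {grid : List (List Char)} {pt : Char} (P : Cell × Cell → Bool) (c : Cell) :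
    ∀ M : List Cell, (pairsOf grid pt c M).countP P
      = M.countP (fun m => borderCk grid pt c m && P (c, m)) := by
  intro M
  induction M with
  | nil => rfl
  | cons m M ih =>
    by_cases hb : borderCk grid pt c m = true
    · rw [show pairsOf grid pt c (m :: M) = (c, m) :: pairsOf grid pt c M by simp [pairsOf, hb]]
      rw [List.countP_cons, List.countP_cons, ih, hb]
      simp
    · have hbF : borderCk grid pt c m = false := by
        rcases h : borderCk grid pt c m with _ | _
        · rfl
        · exact absurd h hb
      rw [show pairsOf grid pt c (m :: M) = pairsOf grid pt c M by simp [pairsOf, hbF]]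
      rw [List.countP_cons, ih, hbF]
      simp

theorem corner_eq {grid : List (List Char)} {pt : Char} {R : List Cell} (hnd : R.Nodup) :
    cornerCnt grid pt R (PySem.Set.ofList R) = LEcnt (Epairs grid pt R) := by
  rw [PySem.Set.ofList_eq_self_of_nodup R hnd]
  rw [cornerCnt]
  simp only [PySem.List.foldl_count_if, PySem.List.foldl_add, zero_add]
  have hcast : ∀ (l : List Cell) (f : Cell → Nat),
      (l.map (fun c => ((f c : Nat) : Int))).sum = ((l.map f).sum : Int) := by
    intro l f
    induction l with
    | nil => rfl
    | cons x l ih => simp [ih]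
  rw [hcast R _]
  rw [LEcnt, Epairs, List.countP_flatMap]
  rw [show List.flatMap (fun c => pairsOf grid pt c movesA) R = Epairs grid pt R from rfl]
  congr 1
  apply congrArg List.sum
  apply List.map_congr_left
  intro c _
  simp only [Function.comp_apply]
  rw [countP_pairsOf (grid := grid) (pt := pt)
    (fun p => !decide (prevp p ∈ Epairs grid pt R)) c movesA]
  apply List.countP_congr
  intro m hmA
  have hmem : ((prev_cell c m, m) ∈ Epairs grid pt R)
      ↔ (prev_cell c m ∈ R ∧ borderCk grid pt (prev_cell c m) m = true) := by
    rw [mem_Epairs]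
    exact ⟨fun ⟨x, _, z⟩ => ⟨x, z⟩, fun ⟨x, z⟩ => ⟨x, hmA, z⟩⟩
  have hcont : PySem.Set.contains R (prev_cell c m) = decide (prev_cell c m ∈ R) := by
    by_cases hx : prev_cell c m ∈ R
    · rw [(PySem.Set.contains_iff R _).2 hx]
      simp [hx]
    · simp only [hx, decide_false]
      rcases h : PySem.Set.contains R (prev_cell c m) with _ | _
      · rfl
      · exact absurd ((PySem.Set.contains_iff R _).1 h) hx
  rw [borderCk, prevp]
  simp only [hcont]
  by_cases h1 : prev_cell c m ∈ R <;>
    by_cases h2 : same_plotG grid ((prev_cell c m).1 + m.1, (prev_cell c m).2 + m.2) pt = true <;>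
    · simp only [h1, decide_true, decide_false, Bool.not_true, Bool.not_false]
      rw [show decide ((prev_cell c m, m) ∈ Epairs grid pt R)
          = decide (prev_cell c m ∈ R ∧ borderCk grid pt (prev_cell c m) m = true) from
        decide_eq_decide.2 hmem]
      simp [borderCk, h1, h2]

-- ---- region and whole-grid equivalence ----
theorem region_eq (grid : List (List Char)) (pt : Char) (c0 : Cell) (v0 : PySem.Set Cell) :
    get_area_x_sides grid c0 pt v0
      = (if PySem.Set.contains v0 c0 then (0, v0)
         else
           ((PySem.List.len (floodB grid (PySem.List.len grid)
                (PySem.List.len (PySem.List.pyGetD grid 0 [])) pt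
                ((PySem.List.len grid * PySem.List.len (PySem.List.pyGetD grid 0 [])).toNat + 1)
                [c0] 0 (PySem.Set.add v0 c0)).1
              * sidesB grid (PySem.List.len grid)
                  (PySem.List.len (PySem.List.pyGetD grid 0 [])) pt
                  (floodB grid (PySem.List.len grid)
                    (PySem.List.len (PySem.List.pyGetD grid 0 [])) pt
                    ((PySem.List.len grid * PySem.List.len (PySem.List.pyGetD grid 0 [])).toNat + 1)
                    [c0] 0 (PySem.Set.add v0 c0)).1
                  (PySem.Set.ofList (floodB grid (PySem.List.len grid)
                    (PySem.List.len (PySem.List.pyGetD grid 0 [])) pt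
                    ((PySem.List.len grid * PySem.List.len (PySem.List.pyGetD grid 0 [])).toNat + 1)
                    [c0] 0 (PySem.Set.add v0 c0)).1)),
            (floodB grid (PySem.List.len grid)
                (PySem.List.len (PySem.List.pyGetD grid 0 [])) pt
                ((PySem.List.len grid * PySem.List.len (PySem.List.pyGetD grid 0 [])).toNat + 1)
                [c0] 0 (PySem.Set.add v0 c0)).2)) := by
  rw [get_area_x_sides]
  rcases hc : PySem.Set.contains v0 c0 with _ | _
  · simp only [hc, Bool.false_eq_true, if_false]
    have hchr0 : Chr PySem.Dict.empty PySem.Dict.empty (Epairs grid pt []) := by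
      intro k w m hm
      constructor
      · intro h
        rcases hx : isXm m with _ | _ <;>
          · rw [hx] at h
            simp [PySem.Dict.getD_empty, PySem.Set.contains_eq_listContains,
              PySem.Set.empty] at h
      · intro h
        cases h
    have hfuel : (cellsOf grid).length + 1
        ≤ ((PySem.List.len grid * PySem.List.len (PySem.List.pyGetD grid 0 [])).toNat + 1)
            + ([] : List Cell).length := by
      rw [cellsOf_length]
      have : (PySem.List.len grid * PySem.List.len (PySem.List.pyGetD grid 0 [])).toNat
          = grid.length * (PySem.List.pyGetD grid 0 []).length := by
        simp only [PySem.List.len_eq]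
        push_cast
        rw [← Nat.cast_mul, Int.toNat_natCast]
      omega
    have hsim := bfs_sim (grid := grid) (pt := pt) (hd := c0) _ [c0] (PySem.Set.add v0 c0) 0 0
      PySem.Dict.empty PySem.Dict.empty []
      ((PySem.List.len grid * PySem.List.len (PySem.List.pyGetD grid 0 [])).toNat + 1) rfl
      (List.nodup_singleton _)
      (by intro d hd; rw [List.mem_singleton] at hd; subst hd
          exact (PySem.Set.mem_add ..).2 (Or.inr rfl))
      (by intro d _ h; cases h) List.nodup_nil (by intro d h; cases h) hchr0 rfl List.nodup_nil
      (by intro d hd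
          simp only [List.nil_append, List.mem_singleton] at hd
          subst hd
          exact List.mem_cons_self)
      hfuel
    obtain ⟨h1, h2⟩ := hsim
    simp only [List.nil_append, List.length_nil, Nat.cast_zero] at h1 h2
    rw [h1]
    rw [sidesB_eq_cornerCnt, corner_eq h2]
    simp only [PySem.List.len_eq]
    congr 1
    ring
  · simp [hc]

theorem cols_guard (grid : List (List Char)) :
    (if grid.isEmpty then (0 : Int) else PySem.List.len (PySem.List.pyGetD grid 0 []))
      = PySem.List.len (PySem.List.pyGetD grid 0 []) := by
  cases grid with
  | nil => simp [PySem.List.pyGetD, PySem.List.pyGet?, PySem.List.len]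
  | cons x xs => simp

theorem fence_eq (input : String) : fence_price input = fence_price_alt input := by
  rw [fence_price, fence_price_alt]
  rw [cols_guard]
  congr 1
  congr 1
  funext acc yr
  rw [PySem.List.enumerate_eq_map_pyRange (d := ' '), List.foldl_map]
  simp only [PySem.List.len_eq]
  apply PySem.List.foldl_congr_mem
  intro acc2 x _
  rw [region_eq]
  rcases hc : PySem.Set.contains acc2.2 (yr.1, x) with _ | _
  · simp
  · simp

-- ===== VERDICT (by name: the statement is the Claim_ definition above) =====
theorem fence_price_spec : Claim_equal_fence_price := by
  intro input _ _
  unfold Spec_fence_price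
  exact fence_eq input
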